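-- pv_equiv track=rewrite | github.com/Segnicho/A2SV | Week2/compare-t-shirt.py | calcTShirtSize
-- ===== SOURCE A (Python) =====
-- vald = ["S", "M", "L"]
--
-- def calcTShirtSize(tshirt):
--     size = 1
--     for letter in tshirt:
--         if letter == "M":
--             return 0
--         if letter not in vald:
--             size += 2
--         if letter == vald[0]:
--             size*=-1
--         if letter == vald[2]:
--             size *= 1
--     return size
-- ===== SOURCE B (Python) =====
-- def calcTShirtSize(tshirt):
--     if "M" in tshirt:
--         return 0
--     s = 0
--     acc = 0
--     for letter in reversed(tshirt):
--         if letter == "S":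
--             s += 1
--         elif letter != "L":
--             acc += 2 if s % 2 == 0 else -2
--     return (1 if s % 2 == 0 else -1) + acc
-- ===== Notes on version B (the rewrite author's own statement) =====
-- stated objective: alternative
-- what changed: Instead of A's forward pass mutating a signed accumulator (add 2, multiply by -1 on each 'S'), B walks the string in reverse keeping only an S-parity counter and adds a closed-form contribution +/-2 per non-S/M/L character, combining with a parity-determined +/-1 at the end.
import Mathlib
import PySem

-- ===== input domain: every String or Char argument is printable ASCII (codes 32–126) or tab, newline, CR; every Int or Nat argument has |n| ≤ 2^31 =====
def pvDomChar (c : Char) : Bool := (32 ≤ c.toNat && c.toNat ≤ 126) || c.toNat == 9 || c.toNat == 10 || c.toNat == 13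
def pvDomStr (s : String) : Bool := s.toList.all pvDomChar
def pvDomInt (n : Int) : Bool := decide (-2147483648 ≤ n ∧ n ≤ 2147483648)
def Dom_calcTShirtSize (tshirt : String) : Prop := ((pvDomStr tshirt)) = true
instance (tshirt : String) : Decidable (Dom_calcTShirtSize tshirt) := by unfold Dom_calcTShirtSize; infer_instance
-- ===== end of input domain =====

-- B replaces A's forward sign-flipping accumulator with a reversed pass using an S-parity
-- counter and closed-form ±2 contributions (objective: alternative; same O(n) cost).


-- ===== PORT A =====
-- loop of A: early 'return 0' on 'M', otherwise the three sequential updates of `size`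
def pvALoop : List Char → Int → Int
  | [], size => size
  | c :: cs, size =>
    if c = 'M' then 0
    else
      let s1 := if c ∉ (['S', 'M', 'L'] : List Char) then size + 2 else size
      let s2 := if c = 'S' then s1 * (-1) else s1
      let s3 := if c = 'L' then s2 * 1 else s2
      pvALoop cs s3

def calcTShirtSize (tshirt : String) : Int := pvALoop tshirt.toList 1

-- ===== PORT B =====
-- loop of B over reversed(tshirt): s = S-count so far, acc = sum of ±2 contributions
def pvBLoop : List Char → Nat → Int → Nat × Int
  | [], s, acc => (s, acc)
  | c :: cs, s, acc =>
    if c = 'S' then pvBLoop cs (s + 1) acc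
    else if c ≠ 'L' then pvBLoop cs s (acc + (if s % 2 = 0 then 2 else -2))
    else pvBLoop cs s acc

def calcTShirtSize_alt (tshirt : String) : Int :=
  if 'M' ∈ tshirt.toList then 0
  else
    let p := pvBLoop tshirt.toList.reverse 0 0
    (if p.1 % 2 = 0 then (1 : Int) else -1) + p.2

-- ===== PRECONDITION & SPEC =====
def Spec_calcTShirtSize (tshirt : String) (out : Int) : Prop := out = calcTShirtSize_alt tshirt
instance (tshirt : String) (out : Int) : Decidable (Spec_calcTShirtSize tshirt out) := by unfold Spec_calcTShirtSize; infer_instance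

-- ===== CLAIM (what is proved, stated in full; the proofs are below) =====
def Claim_equal_calcTShirtSize : Prop := ∀ (tshirt : String), Dom_calcTShirtSize tshirt → Spec_calcTShirtSize tshirt (calcTShirtSize tshirt)

-- ===== LEMMAS AND PROOFS =====

-- sign determined by the parity of the number of 'S' in a list
def pvSgn (l : List Char) : Int := if l.count 'S' % 2 = 0 then 1 else -1

-- closed-form value of B's accumulator started at parity 0
def pvD : List Char → Int
  | [] => 0
  | c :: cs => if c = 'S' then -pvD cs else if c = 'L' then pvD cs else 2 + pvD cs

theorem pvALoop_M {l : List Char} (h : 'M' ∈ l) (size : Int) : pvALoop l size = 0 := by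
  induction l generalizing size with
  | nil => cases h
  | cons c cs ih =>
    by_cases hc : c = 'M'
    · simp [pvALoop, hc]
    · have : 'M' ∈ cs := by
        rcases List.mem_cons.mp h with h1 | h1
        · exact absurd h1.symm hc
        · exact h1
      simp only [pvALoop, if_neg hc]
      exact ih this _

theorem pvALoop_cons {c : Char} {cs : List Char} (hc : c ≠ 'M') (size : Int) :
    pvALoop (c :: cs) size =
      pvALoop cs (if c = 'S' then -size else if c = 'L' then size else size + 2) := by
  simp only [pvALoop, if_neg hc]
  by_cases hS : c = 'S'
  · subst hS; norm_num
  · by_cases hL : c = 'L'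
    · subst hL; norm_num
    · have hin : c ∉ (['S','M','L'] : List Char) := by simp [hS, hc, hL]
      simp [hin, hS, hL]

theorem pvCount_cons_S (cs : List Char) : ('S' :: cs).count 'S' = cs.count 'S' + 1 :=
  List.count_cons_self ..

theorem pvCount_cons_ne {c : Char} (hS : c ≠ 'S') (cs : List Char) :
    (c :: cs).count 'S' = cs.count 'S' :=
  List.count_cons_of_ne hS

theorem pvSgn_cons_S (cs : List Char) : pvSgn ('S' :: cs) = -pvSgn cs := by
  simp only [pvSgn, pvCount_cons_S]
  by_cases hp : cs.count 'S' % 2 = 0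
  · have h2 : (cs.count 'S' + 1) % 2 ≠ 0 := by omega
    simp [hp, h2]
  · have h2 : (cs.count 'S' + 1) % 2 = 0 := by omega
    simp [hp, h2]

theorem pvSgn_cons_ne {c : Char} (hS : c ≠ 'S') (cs : List Char) : pvSgn (c :: cs) = pvSgn cs := by
  simp only [pvSgn, pvCount_cons_ne hS]

theorem pvALoop_lin {l : List Char} (h : 'M' ∉ l) (size : Int) :
    pvALoop l size = pvSgn l * size + pvALoop l 0 := by
  induction l generalizing size with
  | nil => simp [pvALoop, pvSgn]
  | cons c cs ih =>
    have hc : c ≠ 'M' := fun e => h (e ▸ List.mem_cons_self)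
    have hcs : 'M' ∉ cs := fun e => h (List.mem_cons_of_mem _ e)
    rw [pvALoop_cons hc, pvALoop_cons hc]
    by_cases hS : c = 'S'
    · subst hS
      norm_num
      rw [ih hcs (-size), pvSgn_cons_S]
      ring
    · by_cases hL : c = 'L'
      · subst hL
        norm_num
        rw [if_neg (by decide : ¬ ('L' : Char) = 'S'), ih hcs size, pvSgn_cons_ne hS]
      · simp only [if_neg hS, if_neg hL, zero_add]
        rw [ih hcs (size + 2), ih hcs 2, pvSgn_cons_ne hS]
        ring

theorem pvD_cons_S (cs : List Char) : pvD ('S' :: cs) = -pvD cs := by simp [pvD]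

theorem pvD_cons_L (cs : List Char) : pvD ('L' :: cs) = pvD cs := by simp [pvD]

theorem pvD_cons_other {c : Char} (hS : c ≠ 'S') (hL : c ≠ 'L') (cs : List Char) :
    pvD (c :: cs) = 2 + pvD cs := by simp [pvD, hS, hL]

theorem pvD_append (r : List Char) (c : Char) :
    pvD (r ++ [c]) = pvD r +
      (if c = 'S' ∨ c = 'L' then 0 else if r.count 'S' % 2 = 0 then 2 else -2) := by
  induction r with
  | nil =>
    by_cases hS : c = 'S'
    · subst hS; simp [pvD]
    · by_cases hL : c = 'L'
      · subst hL; simp [pvD]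
      · simp [pvD, hS, hL]
  | cons a r' ih =>
    by_cases hA : a = 'S'
    · subst hA
      rw [List.cons_append, pvD_cons_S, pvD_cons_S, ih, pvCount_cons_S]
      by_cases hc : c = 'S' ∨ c = 'L'
      · simp [hc]
      · by_cases hp : r'.count 'S' % 2 = 0
        · have h2 : (r'.count 'S' + 1) % 2 ≠ 0 := by omega
          simp only [if_neg hc, if_pos hp, if_neg h2]; ring
        · have h2 : (r'.count 'S' + 1) % 2 = 0 := by omega
          simp only [if_neg hc, if_neg hp, if_pos h2]; ring
    · rw [pvCount_cons_ne hA]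
      by_cases hL : a = 'L'
      · subst hL
        rw [List.cons_append, pvD_cons_L, pvD_cons_L, ih]
      · rw [List.cons_append, pvD_cons_other hA hL, pvD_cons_other hA hL, ih]; ring

theorem pvALoop0_eq {l : List Char} (h : 'M' ∉ l) : pvALoop l 0 = pvD l.reverse := by
  induction l with
  | nil => simp [pvALoop, pvD]
  | cons c cs ih =>
    have hc : c ≠ 'M' := fun e => h (e ▸ List.mem_cons_self)
    have hcs : 'M' ∉ cs := fun e => h (List.mem_cons_of_mem _ e)
    have hrev : (c :: cs).reverse = cs.reverse ++ [c] := by simp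
    rw [hrev, pvD_append, pvALoop_cons hc]
    by_cases hS : c = 'S'
    · subst hS
      norm_num
      exact ih hcs
    · by_cases hL : c = 'L'
      · subst hL
        norm_num
        exact ih hcs
      · simp only [if_neg hS, if_neg hL, zero_add, if_neg (by simp [hS, hL] :
          ¬ (c = 'S' ∨ c = 'L'))]
        rw [pvALoop_lin hcs 2, ih hcs]
        have hcnt : cs.reverse.count 'S' = cs.count 'S' := List.count_reverse ..
        simp only [pvSgn, hcnt]
        by_cases hp : cs.count 'S' % 2 = 0 <;> simp [hp] <;> ring

theorem pvBLoop_closed (r : List Char) : ∀ (s : Nat) (acc : Int),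
    pvBLoop r s acc = (s + r.count 'S', acc + (if s % 2 = 0 then pvD r else -pvD r)) := by
  induction r with
  | nil => intro s acc; simp [pvBLoop, pvD]
  | cons c cs ih =>
    intro s acc
    by_cases hS : c = 'S'
    · subst hS
      rw [show pvBLoop ('S' :: cs) s acc = pvBLoop cs (s + 1) acc by simp [pvBLoop],
          ih, pvCount_cons_S, pvD_cons_S]
      by_cases hp : s % 2 = 0
      · have h2 : (s + 1) % 2 ≠ 0 := by omega
        simp only [if_pos hp, if_neg h2, Prod.mk.injEq]
        exact ⟨by omega, by trivial⟩
      · have h2 : (s + 1) % 2 = 0 := by omega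
        simp only [if_neg hp, if_pos h2, Prod.mk.injEq]
        exact ⟨by omega, by first | trivial | ring⟩
    · rw [pvCount_cons_ne hS]
      by_cases hL : c = 'L'
      · subst hL
        rw [show pvBLoop ('L' :: cs) s acc = pvBLoop cs s acc by simp [pvBLoop],
            ih, pvD_cons_L]
      · rw [show pvBLoop (c :: cs) s acc
              = pvBLoop cs s (acc + (if s % 2 = 0 then 2 else -2)) by
            simp [pvBLoop, hS, hL],
          ih, pvD_cons_other hS hL]
        by_cases hp : s % 2 = 0 <;>
          simp only [hp, if_true, if_false, Prod.mk.injEq, true_and] <;>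
          ring

-- ===== VERDICT (by name: the statement is the Claim_ definition above) =====
theorem calcTShirtSize_spec : Claim_equal_calcTShirtSize := by
  intro tshirt _
  unfold Spec_calcTShirtSize calcTShirtSize calcTShirtSize_alt
  by_cases hM : 'M' ∈ tshirt.toList
  · rw [if_pos hM, pvALoop_M hM]
  · rw [if_neg hM, pvBLoop_closed]
    simp only [zero_add, Nat.zero_mod, if_true]
    rw [pvALoop_lin hM 1, pvALoop0_eq hM]
    have : tshirt.toList.reverse.count 'S' = tshirt.toList.count 'S' := List.count_reverse ..
    simp only [this, pvSgn]
    by_cases hp : tshirt.toList.count 'S' % 2 = 0 <;> simp [hp]
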